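-- pv_equiv track=rewrite | github.com/RegiMuhammar/agent-review-fastrack | ai-agent/app/graph/nodes/bizplan_search_prep.py | _extract_pricing_terms
-- ===== SOURCE A (Python) =====
-- def _extract_pricing_terms(signal: str) -> list[str]:
--     lowered = signal.lower()
--     terms: list[str] = []
--
--     for needle, label in [
--         ("subscription", "subscription"),
--         ("langganan", "subscription"),
--         ("paket", "subscription"),
--         ("license", "license"),
--         ("lisensi", "license"),
--         ("setup fee", "setup fee"),
--         ("komisi", "commission"),
--         ("commission", "commission"),
--         ("transaction fee", "transaction fee"),
--         ("per tahun", "annual"),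
--         ("per bulan", "monthly"),
--         ("campus", "campus"),
--         ("kampus", "campus"),
--         ("school", "school"),
--         ("sekolah", "school"),
--         ("university", "university"),
--     ]:
--         if needle in lowered and label not in terms:
--             terms.append(label)
--
--     return terms
-- ===== SOURCE B (Python) =====
-- # Naive multi-pattern position scan: walk the lowered text once position by
-- # position, recording which canonical labels have a synonym starting there,
-- # then emit labels in canonical order.
--
-- _NEEDLE_LABELS = {
--     "subscription": "subscription",
--     "langganan": "subscription",
--     "paket": "subscription",
--     "license": "license",
--     "lisensi": "license",
--     "setup fee": "setup fee",
--     "komisi": "commission",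
--     "commission": "commission",
--     "transaction fee": "transaction fee",
--     "per tahun": "annual",
--     "per bulan": "monthly",
--     "campus": "campus",
--     "kampus": "campus",
--     "school": "school",
--     "sekolah": "school",
--     "university": "university",
-- }
--
-- _LABEL_ORDER = [
--     "subscription", "license", "setup fee", "commission", "transaction fee",
--     "annual", "monthly", "campus", "school", "university",
-- ]
--
--
-- def _extract_pricing_terms(text: str) -> list[str]:
--     lowered = text.lower()
--     hits: set[str] = set()
--     for i in range(len(lowered)):
--         for needle, label in _NEEDLE_LABELS.items():
--             if label not in hits and lowered.startswith(needle, i):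
--                 hits.add(label)
--     return [label for label in _LABEL_ORDER if label in hits]
-- ===== Notes on version B (the rewrite author's own statement) =====
-- stated objective: alternative
-- what changed: Replaces A's per-needle substring scans with an explicit dedup list by a single left-to-right position scan of the lowered text (naive multi-pattern prefix matching into a found-set) followed by an order-restoring filter over the canonical label list; it trades CPython's fast C-level substring search for an explicit per-position matcher.
import Mathlib
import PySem

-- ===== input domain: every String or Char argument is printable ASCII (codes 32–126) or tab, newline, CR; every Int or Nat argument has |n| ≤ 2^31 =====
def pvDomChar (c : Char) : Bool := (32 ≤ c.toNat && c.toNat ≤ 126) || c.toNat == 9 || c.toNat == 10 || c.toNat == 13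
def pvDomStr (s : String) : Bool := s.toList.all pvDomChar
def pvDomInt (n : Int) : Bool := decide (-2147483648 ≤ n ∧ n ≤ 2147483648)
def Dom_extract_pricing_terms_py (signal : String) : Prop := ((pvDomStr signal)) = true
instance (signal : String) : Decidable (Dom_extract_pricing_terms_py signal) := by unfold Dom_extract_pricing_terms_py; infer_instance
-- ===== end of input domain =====

-- B replaces A's per-needle substring scans with explicit dedup by a single left-to-right
-- position scan of the lowered text (prefix match per position into a found-set) followed by
-- an order-restoring filter over the canonical label list — alternative decomposition.

-- ===== PORT A =====
def extract_pricing_terms_py (signal : String) : List String :=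
  let lowered := PySem.Str.lower signal
  ([("subscription", "subscription"), ("langganan", "subscription"), ("paket", "subscription"),
    ("license", "license"), ("lisensi", "license"),
    ("setup fee", "setup fee"),
    ("komisi", "commission"), ("commission", "commission"),
    ("transaction fee", "transaction fee"),
    ("per tahun", "annual"), ("per bulan", "monthly"),
    ("campus", "campus"), ("kampus", "campus"),
    ("school", "school"), ("sekolah", "school"),
    ("university", "university")] : List (String × String)).foldl
    (fun terms nl =>
      if PySem.Str.isIn nl.1 lowered && !(terms.contains nl.2) then terms ++ [nl.2] else terms)
    []

-- ===== PORT B =====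
def pvNeedleLabels : List (String × String) :=
  [("subscription", "subscription"), ("langganan", "subscription"), ("paket", "subscription"),
   ("license", "license"), ("lisensi", "license"),
   ("setup fee", "setup fee"),
   ("komisi", "commission"), ("commission", "commission"),
   ("transaction fee", "transaction fee"),
   ("per tahun", "annual"), ("per bulan", "monthly"),
   ("campus", "campus"), ("kampus", "campus"),
   ("school", "school"), ("sekolah", "school"),
   ("university", "university")]

def pvLabelOrder : List String :=
  ["subscription", "license", "setup fee", "commission", "transaction fee",
   "annual", "monthly", "campus", "school", "university"]

-- Source B's position scan: for i in range(len(lowered)): for needle, label in items():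
--   if label not in hits and lowered.startswith(needle, i): hits.add(label)
-- 'lowered.startswith(needle, i)' with 0 ≤ i is exactly Chars.startswith on (lowered.drop i).
def pvScan (lowered : List Char) : PySem.Set String :=
  (List.range lowered.length).foldl
    (fun hits i =>
      pvNeedleLabels.foldl
        (fun hits nl =>
          if !(hits.contains nl.2) && PySem.Chars.startswith (lowered.drop i) nl.1.toList
          then PySem.Set.add hits nl.2 else hits)
        hits)
    PySem.Set.empty

def extract_pricing_terms_py_alt (signal : String) : List String :=
  let lowered := PySem.Chars.lower signal.toList
  let hits := pvScan lowered
  pvLabelOrder.filter (fun l => hits.contains l)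

-- ===== PRECONDITION & SPEC =====
def Spec_extract_pricing_terms_py (signal : String) (out : List String) : Prop := out = extract_pricing_terms_py_alt signal
instance (signal : String) (out : List String) : Decidable (Spec_extract_pricing_terms_py signal out) := by unfold Spec_extract_pricing_terms_py; infer_instance

-- ===== CLAIM (what is proved, stated in full; the proofs are below) =====
def Claim_equal_extract_pricing_terms_py : Prop := ∀ (signal : String), Dom_extract_pricing_terms_py signal → Spec_extract_pricing_terms_py signal (extract_pricing_terms_py signal)

-- ===== LEMMAS AND PROOFS =====

-- membership in the inner (needle) fold of B's scan
theorem pv_mem_inner (lowered : List Char) (i : Nat) (ns : List (String × String))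
    (hits : List String) (l : String) :
    l ∈ ns.foldl
        (fun hits nl =>
          if !(hits.contains nl.2) && PySem.Chars.startswith (lowered.drop i) nl.1.toList
          then PySem.Set.add hits nl.2 else hits) hits
      ↔ l ∈ hits ∨ ∃ nl ∈ ns, nl.2 = l ∧
          PySem.Chars.startswith (lowered.drop i) nl.1.toList = true := by
  induction ns generalizing hits with
  | nil => simp
  | cons hd tl ih =>
    simp only [List.foldl_cons, ih, List.mem_cons]
    by_cases hc : hd.2 ∈ hits <;> cases hs : PySem.Chars.startswith (lowered.drop i) hd.1.toList <;>
      simp [hc, hs] <;> aesop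

-- membership in B's full scan
theorem pv_mem_scan (lowered : List Char) (l : String) :
    l ∈ pvScan lowered ↔ ∃ nl ∈ pvNeedleLabels, nl.2 = l ∧
      ∃ i < lowered.length, PySem.Chars.startswith (lowered.drop i) nl.1.toList = true := by
  unfold pvScan
  have key : ∀ (is : List Nat) (hits : List String),
      l ∈ is.foldl
          (fun hits i =>
            pvNeedleLabels.foldl
              (fun hits nl =>
                if !(hits.contains nl.2) && PySem.Chars.startswith (lowered.drop i) nl.1.toList
                then PySem.Set.add hits nl.2 else hits) hits) hits
        ↔ l ∈ hits ∨ ∃ i ∈ is, ∃ nl ∈ pvNeedleLabels, nl.2 = l ∧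
            PySem.Chars.startswith (lowered.drop i) nl.1.toList = true := by
    intro is
    induction is with
    | nil => simp
    | cons hd tl ih =>
      intro hits
      simp only [List.foldl_cons, ih, pv_mem_inner, List.mem_cons]
      aesop
  rw [key]
  simp only [PySem.Set.empty, List.not_mem_nil, false_or, List.mem_range]
  aesop

-- a bounded prefix-position hit for a non-empty needle is exactly 'needle in lowered'
theorem pv_exists_lt_iff_isIn (lowered : List Char) (n : String) (hn : n.toList ≠ []) :
    (∃ i < lowered.length, PySem.Chars.startswith (lowered.drop i) n.toList = true)
      ↔ PySem.Chars.isIn n.toList lowered = true := by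
  rw [← PySem.Chars.exists_prefix_drop_iff_isIn]
  constructor
  · rintro ⟨i, _, hi⟩
    exact ⟨i, (PySem.Chars.startswith_iff _ _).1 hi⟩
  · rintro ⟨j, hj⟩
    by_cases h : j < lowered.length
    · exact ⟨j, h, (PySem.Chars.startswith_iff _ _).2 hj⟩
    · exfalso
      rw [List.drop_eq_nil_of_le (by omega)] at hj
      exact hn (List.prefix_nil.mp hj)

-- B's membership test as a Boolean over the needle table
theorem pv_contains_scan (lowered : List Char) (l : String) :
    (pvScan lowered).contains l =
      pvNeedleLabels.any (fun nl => nl.2 == l && PySem.Chars.isIn nl.1.toList lowered) := by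
  have hne : ∀ nl ∈ pvNeedleLabels, nl.1.toList ≠ [] := by decide
  rw [Bool.eq_iff_iff, PySem.Set.contains_iff, pv_mem_scan, List.any_eq_true]
  simp only [Bool.and_eq_true, beq_iff_eq]
  constructor
  · rintro ⟨nl, hmem, hl, hex⟩
    exact ⟨nl, hmem, hl, (pv_exists_lt_iff_isIn lowered nl.1 (hne nl hmem)).1 hex⟩
  · rintro ⟨nl, hmem, hl, hin⟩
    exact ⟨nl, hmem, hl, (pv_exists_lt_iff_isIn lowered nl.1 (hne nl hmem)).2 hin⟩

-- A's loop body, with the substring test abstracted into f (f = needle ↦ needle in lowered).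
def pvStep (f : String → Bool) (terms : List String) (nl : String × String) : List String :=
  if f nl.1 && !(terms.contains nl.2) then terms ++ [nl.2] else terms

-- the segment a group of needles sharing one label contributes
def pvSeg (c : Bool) (l : String) : List String := if c then [l] else []

theorem pv_mem_seg (c : Bool) (l l' : String) : l' ∈ pvSeg c l ↔ c = true ∧ l' = l := by
  cases c <;> simp [pvSeg]

-- the filter over the canonical label list also peels into the same segments
theorem pv_filter_seg (p : String → Bool) (x : String) (xs : List String) :
    List.filter p (x :: xs) = pvSeg (p x) x ++ List.filter p xs := by
  cases h : p x <;> simp [h, pvSeg]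

-- A's fold over a group of 1/2/3 needles with the same, not-yet-collected label
theorem pv_grp1 (f : String → Bool) (terms : List String) (n1 l : String) (h : l ∉ terms) :
    List.foldl (pvStep f) terms [(n1, l)] = terms ++ pvSeg (f n1) l := by
  cases h1 : f n1 <;> simp [pvStep, pvSeg, List.foldl, h, h1]

theorem pv_grp2 (f : String → Bool) (terms : List String) (n1 n2 l : String) (h : l ∉ terms) :
    List.foldl (pvStep f) terms [(n1, l), (n2, l)] = terms ++ pvSeg (f n1 || f n2) l := by
  cases h1 : f n1 <;> cases h2 : f n2 <;> simp [pvStep, pvSeg, List.foldl, h, h1, h2]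

theorem pv_grp3 (f : String → Bool) (terms : List String) (n1 n2 n3 l : String) (h : l ∉ terms) :
    List.foldl (pvStep f) terms [(n1, l), (n2, l), (n3, l)] =
      terms ++ pvSeg (f n1 || f n2 || f n3) l := by
  cases h1 : f n1 <;> cases h2 : f n2 <;> cases h3 : f n3 <;>
    simp [pvStep, pvSeg, List.foldl, h, h1, h2, h3]

-- ===== VERDICT (by name: the statement is the Claim_ definition above) =====
theorem extract_pricing_terms_py_spec : Claim_equal_extract_pricing_terms_py := by
  intro signal _
  unfold Spec_extract_pricing_terms_py extract_pricing_terms_py extract_pricing_terms_py_alt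
  show List.foldl (pvStep (fun n => PySem.Str.isIn n (PySem.Str.lower signal))) [] _ = _
  set f : String → Bool := fun n => PySem.Str.isIn n (PySem.Str.lower signal) with hf
  rw [show ([("subscription", "subscription"), ("langganan", "subscription"), ("paket", "subscription"),
    ("license", "license"), ("lisensi", "license"), ("setup fee", "setup fee"),
    ("komisi", "commission"), ("commission", "commission"), ("transaction fee", "transaction fee"),
    ("per tahun", "annual"), ("per bulan", "monthly"), ("campus", "campus"), ("kampus", "campus"),
    ("school", "school"), ("sekolah", "school"), ("university", "university")] : List (String × String)) =
      [("subscription", "subscription"), ("langganan", "subscription"), ("paket", "subscription")] ++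
      ([("license", "license"), ("lisensi", "license")] ++
      ([("setup fee", "setup fee")] ++
      ([("komisi", "commission"), ("commission", "commission")] ++
      ([("transaction fee", "transaction fee")] ++
      ([("per tahun", "annual")] ++
      ([("per bulan", "monthly")] ++
      ([("campus", "campus"), ("kampus", "campus")] ++
      ([("school", "school"), ("sekolah", "school")] ++
      [("university", "university")])))))))) from rfl]
  rw [List.foldl_append, pv_grp3 f [] _ _ _ _ (by simp)]
  rw [List.foldl_append, pv_grp2 f _ _ _ _ (by simp [pv_mem_seg])]
  rw [List.foldl_append, pv_grp1 f _ _ _ (by simp [pv_mem_seg])]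
  rw [List.foldl_append, pv_grp2 f _ _ _ _ (by simp [pv_mem_seg])]
  rw [List.foldl_append, pv_grp1 f _ _ _ (by simp [pv_mem_seg])]
  rw [List.foldl_append, pv_grp1 f _ _ _ (by simp [pv_mem_seg])]
  rw [List.foldl_append, pv_grp1 f _ _ _ (by simp [pv_mem_seg])]
  rw [List.foldl_append, pv_grp2 f _ _ _ _ (by simp [pv_mem_seg])]
  rw [List.foldl_append, pv_grp2 f _ _ _ _ (by simp [pv_mem_seg])]
  rw [pv_grp1 f _ _ _ (by simp [pv_mem_seg])]
  simp only [pvLabelOrder, pv_filter_seg, List.filter_nil, pv_contains_scan, pvNeedleLabels,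
    List.any_cons, List.any_nil, hf, PySem.Str.isIn_eq, PySem.Str.toList_lower]
  simp only [String.reduceBEq, beq_self_eq_true, Bool.true_and, Bool.false_and, Bool.or_false,
    Bool.false_or, Bool.or_assoc, List.append_assoc, List.nil_append, List.append_nil]
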